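-- pv_equiv track=rewrite | github.com/tee-ar-ex/trx-python | tools/update_switcher.py | add_version
-- ===== SOURCE A (Python) =====
-- BASE_URL = "https://tee-ar-ex.github.io/trx-python"
--
-- def add_version(versions, version):
--     """Add a new version entry to the versions list.
--
--     Parameters
--     ----------
--     versions : list
--         List of version entries.
--     version : str
--         Version string to add (e.g., "0.5.0").
--
--     Returns
--     -------
--     list
--         Updated versions list.
--     """
--     # Remove 'preferred' from all existing entries
--     for v in versions:
--         v.pop('preferred', None)
--
--     # Check if this version already exists
--     version_exists = any(v.get('version') == version for v in versions)
--
--     if not version_exists: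
--         new_entry = {
--             "name": version,
--             "version": version,
--             "url": f"{BASE_URL}/{version}/"
--         }
--         # Find dev entry index to insert after it
--         dev_idx = next(
--             (i for i, v in enumerate(versions) if v.get('version') == 'dev'),
--             -1
--         )
--         if dev_idx >= 0:
--             versions.insert(dev_idx + 1, new_entry)
--         else:
--             versions.insert(0, new_entry)
--
--     return versions
-- ===== SOURCE B (Python) =====
-- BASE_URL = "https://tee-ar-ex.github.io/trx-python"
--
--
-- def _splice_after_dev(entries, new_entry):
--     """Consume the entries through an iterator; once the first 'dev' entry is
--     seen, rebuild the list by concatenation: prefix + [new_entry] + remainder.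
--     Returns None when no 'dev' entry exists."""
--     pre = []
--     it = iter(entries)
--     for v in it:
--         pre.append(v)
--         if v.get('version') == 'dev':
--             return pre + [new_entry] + list(it)
--     return None
--
--
-- def add_version(versions, version):
--     """Pure rebuild: comprehension-cleaned copies of the entries, a set of
--     version strings for the existence test, and an iterator splice after the
--     first 'dev' entry (no index arithmetic, no list.insert).  Return-value
--     equivalent to A; A also mutates the entry dicts in place, B rebuilds them
--     (the versions list itself gets the same final contents via versions[:])."""
--     cleaned = [{k: x for k, x in v.items() if k != 'preferred'} for v in versions]
--     if version in {v.get('version') for v in cleaned}: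
--         versions[:] = cleaned
--         return versions
--     new_entry = {"name": version, "version": version, "url": f"{BASE_URL}/{version}/"}
--     spliced = _splice_after_dev(cleaned, new_entry)
--     versions[:] = [new_entry] + cleaned if spliced is None else spliced
--     return versions
-- ===== Notes on version B (the rewrite author's own statement) =====
-- stated objective: alternative
-- what changed: Instead of in-place pop/any()/next()-index/list.insert, B rebuilds the list purely: dict comprehensions strip 'preferred', a set of version strings answers the existence test, and the new entry is spliced by concatenation after the first 'dev' entry via an iterator split (no index arithmetic or insert).
import Mathlib
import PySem

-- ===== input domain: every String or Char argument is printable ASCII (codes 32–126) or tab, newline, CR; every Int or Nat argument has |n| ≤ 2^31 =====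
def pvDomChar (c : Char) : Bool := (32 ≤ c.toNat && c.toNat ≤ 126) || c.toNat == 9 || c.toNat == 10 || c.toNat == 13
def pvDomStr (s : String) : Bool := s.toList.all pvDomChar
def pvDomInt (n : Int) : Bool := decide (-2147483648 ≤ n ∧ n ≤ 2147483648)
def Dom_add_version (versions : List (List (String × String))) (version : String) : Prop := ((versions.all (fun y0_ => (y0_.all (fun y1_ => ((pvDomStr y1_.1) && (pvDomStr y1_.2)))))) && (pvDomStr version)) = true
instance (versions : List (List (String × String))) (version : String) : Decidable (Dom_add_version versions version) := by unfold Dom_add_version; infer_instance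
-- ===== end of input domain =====

-- ===== PORT A =====
-- B rebuilds the list purely (comprehension-cleaned copies, a set for the existence test,
-- an iterator splice after the first 'dev' entry); the equivalence is about the RETURN value
-- (in Python A mutates the entry dicts in place, B rebuilds them; the list gets the same contents).
-- v.pop('preferred', None) on a dict: drop the 'preferred' key (dict keys are unique).
def pvPopPref (v : List (String × String)) : List (String × String) :=
  v.filter (fun p => !(p.1 == "preferred"))

-- v.get('version'): first-match lookup in the association list
def pvGetVer (v : List (String × String)) : Option String :=
  List.lookup "version" v

-- next((i for i, v in enumerate(versions) if v.get('version') == 'dev'), -1)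
def pvDevNext (i : Nat) (vs : List (List (String × String))) : Int :=
  match vs with
  | [] => -1
  | v :: rest => if pvGetVer v == some "dev" then (i : Int) else pvDevNext (i + 1) rest

def add_version (versions : List (List (String × String))) (version : String) : List (List (String × String)) :=
  -- for v in versions: v.pop('preferred', None)
  let vs := versions.map pvPopPref
  -- version_exists = any(...)
  let version_exists := vs.any (fun v => pvGetVer v == some version)
  if !version_exists then
    let new_entry := [("name", version), ("version", version),
                      ("url", "https://tee-ar-ex.github.io/trx-python" ++ "/" ++ version ++ "/")]
    let dev_idx := pvDevNext 0 vs
    if dev_idx ≥ 0 then PySem.List.insert vs (dev_idx + 1) new_entry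
    else PySem.List.insert vs 0 new_entry
  else vs

-- ===== PORT B =====
-- {k: x for k, x in v.items() if k != 'preferred'}
def pvCleanB (v : List (String × String)) : List (String × String) :=
  v.filter (fun p => p.1 != "preferred")

-- _splice_after_dev: accumulate the prefix, splice by concatenation at the first 'dev'
def pvSplice (e : List (String × String)) (pre : List (List (String × String)))
    (entries : List (List (String × String))) : Option (List (List (String × String))) :=
  match entries with
  | [] => none
  | v :: rest =>
    let pre' := pre ++ [v]
    if pvGetVer v == some "dev" then some (pre' ++ [e] ++ rest)
    else pvSplice e pre' rest

def add_version_alt (versions : List (List (String × String))) (version : String) : List (List (String × String)) :=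
  let cleaned := versions.map pvCleanB
  -- version in {v.get('version') for v in cleaned}
  if (PySem.Set.ofList (cleaned.map pvGetVer)).contains (some version) then cleaned
  else
    let new_entry := [("name", version), ("version", version),
                      ("url", "https://tee-ar-ex.github.io/trx-python" ++ "/" ++ version ++ "/")]
    match pvSplice new_entry [] cleaned with
    | none => new_entry :: cleaned
    | some r => r

-- ===== PRECONDITION & SPEC =====
def Spec_add_version (versions : List (List (String × String))) (version : String) (out : List (List (String × String))) : Prop := out = add_version_alt versions version
instance (versions : List (List (String × String))) (version : String) (out : List (List (String × String))) : Decidable (Spec_add_version versions version out) := by unfold Spec_add_version; infer_instance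

-- ===== CLAIM (what is proved, stated in full; the proofs are below) =====
def Claim_equal_add_version : Prop := ∀ (versions : List (List (String × String))) (version : String), Dom_add_version versions version → Spec_add_version versions version (add_version versions version)

-- ===== LEMMAS AND PROOFS =====
-- index of the first 'dev' entry, the spine both ports' searches share
def pvDevIdx (vs : List (List (String × String))) : Option Nat :=
  match vs with
  | [] => none
  | v :: rest => if pvGetVer v == some "dev" then some 0 else (pvDevIdx rest).map (· + 1)

theorem pvDevIdx_lt (vs : List (List (String × String))) (j : Nat)
    (h : pvDevIdx vs = some j) : j < vs.length := by
  induction vs generalizing j with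
  | nil => simp [pvDevIdx] at h
  | cons v rest ih =>
    simp only [pvDevIdx] at h
    split at h
    · simp_all; omega
    · cases hr : pvDevIdx rest with
      | none => simp [hr] at h
      | some k => simp [hr] at h; subst h; simpa using Nat.succ_lt_succ (ih k hr)

theorem pvDevNext_eq (vs : List (List (String × String))) : ∀ i : Nat,
    pvDevNext i vs = (match pvDevIdx vs with | none => (-1 : Int) | some j => (i : Int) + (j : Int)) := by
  induction vs with
  | nil => intro i; rfl
  | cons v rest ih =>
    intro i
    simp only [pvDevNext, pvDevIdx]
    split
    · simp
    · rw [ih]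
      cases hr : pvDevIdx rest <;> simp [Int.add_assoc, Int.add_comm 1]

theorem pvSplice_eq (e : List (String × String)) (vs : List (List (String × String))) :
    ∀ pre, pvSplice e pre vs =
      (match pvDevIdx vs with
       | none => none
       | some j => some (pre ++ vs.take (j + 1) ++ e :: vs.drop (j + 1))) := by
  induction vs with
  | nil => intro pre; rfl
  | cons v rest ih =>
    intro pre
    simp only [pvSplice, pvDevIdx]
    split
    · simp
    · rw [ih]
      cases hr : pvDevIdx rest <;> simp

theorem pvContains_eq (L : List (Option String)) (x : Option String) :
    (PySem.Set.ofList L).contains x = L.any (fun y => y == x) := by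
  have h1 : (PySem.Set.ofList L).contains x = true ↔ x ∈ L := by
    simp [PySem.Set.contains, PySem.Set.mem_ofList]
  have h2 : L.any (fun y => y == x) = true ↔ x ∈ L := by
    simp [List.any_eq_true]
  rw [Bool.eq_iff_iff, h1, h2]

-- ===== VERDICT (by name: the statement is the Claim_ definition above) =====
theorem add_version_spec : Claim_equal_add_version := by
  intro versions version _
  unfold Spec_add_version add_version add_version_alt
  have hclean : pvCleanB = pvPopPref := rfl
  rw [hclean]
  set vs := versions.map pvPopPref with hvs
  have hex' : ((vs.map pvGetVer).any (fun y => y == some version)) =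
      (vs.any (fun v => pvGetVer v == some version)) := by
    simp [List.any_map, Function.comp_def]
  simp only [pvContains_eq, hex', pvSplice_eq, pvDevNext_eq]
  by_cases hex : vs.any (fun v => pvGetVer v == some version)
  · simp [hex]
  · simp only [hex, Bool.not_false, if_true, Bool.false_eq_true, if_false]
    cases hd : pvDevIdx vs with
    | none => simp [PySem.List.insert_zero]
    | some j =>
      have hj : j + 1 ≤ vs.length := pvDevIdx_lt vs j hd
      have hcast : (((0 : Nat) : Int) + (j : Int) + 1) = ((j + 1 : Nat) : Int) := by push_cast; ring
      have hge : (((0 : Nat) : Int) + (j : Int) ≥ 0) := by positivity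
      rw [if_pos hge, hcast, PySem.List.insert_natCast vs (j + 1) _ hj]
      simp
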